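-- pv_equiv track=rewrite | github.com/jshales4/AdventOfCode | 2019/src/aoc_2019_04.py | check_password_for_validity_part2
-- ===== SOURCE A (Python) =====
-- from typing import Tuple, List
--
-- def are_two_adjacent_numbers_same_part2(password_split: List[str]) -> bool:
--     for p in range(0, len(password_split) - 1):
--         if password_split[p] == password_split[p + 1]:
--             if not (
--                 p > 0
--                 and password_split[p - 1] == password_split[p]
--                 or (
--                     p < len(password_split) - 2
--                     and password_split[p + 2] == password_split[p + 1]
--                 )
--             ):
--                 return True
--     return False
--
-- def are_digits_increasing(password_split: List[str]) -> bool: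
--     for i in range(0, len(password_split) - 1):
--         if password_split[i] > password_split[i + 1]:
--             return False
--     return True
--
-- def check_password_for_validity_part2(password: int) -> bool:
--     password_split = [i for i in str(password)]
--     return not (
--         password < 100000
--         or password > 999999
--         or not are_two_adjacent_numbers_same_part2(password_split)
--         or not are_digits_increasing(password_split)
--     )
-- ===== SOURCE B (Python) =====
-- def check_password_for_validity_part2(password: int) -> bool:
--     if password < 100000 or password > 999999:
--         return False
--     s = str(password)
--     runs = []
--     count = 1
--     for prev, cur in zip(s, s[1:]):
--         if cur == prev:
--             count += 1
--         else:
--             runs.append(count)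
--             count = 1
--     runs.append(count)
--     return 2 in runs and all(a <= b for a, b in zip(s, s[1:]))
-- ===== Notes on version B (the rewrite author's own statement) =====
-- stated objective: simpler
-- what changed: B replaces A's index loop that peeks at neighbouring positions (with guard conditions) by a single run-length-grouping pass over adjacent pairs, asking for a run of length exactly two, plus a plain pairwise non-decreasing check.
import Mathlib
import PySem

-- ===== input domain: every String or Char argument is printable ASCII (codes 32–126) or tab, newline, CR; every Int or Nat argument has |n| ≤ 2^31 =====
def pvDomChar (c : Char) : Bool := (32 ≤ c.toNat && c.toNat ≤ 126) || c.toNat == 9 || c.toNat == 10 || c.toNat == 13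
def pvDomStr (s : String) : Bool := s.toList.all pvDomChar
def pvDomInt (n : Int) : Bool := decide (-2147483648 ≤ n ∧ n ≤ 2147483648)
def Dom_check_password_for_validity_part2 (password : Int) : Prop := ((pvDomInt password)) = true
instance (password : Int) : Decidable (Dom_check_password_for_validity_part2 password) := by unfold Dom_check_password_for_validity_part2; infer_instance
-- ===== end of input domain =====

-- B replaces A's index loop with neighbour/next-neighbour peeks by a run-length grouping pass plus a
-- pairwise non-decreasing check (objective: simpler; same cost).

-- ===== PORT A =====
-- xs[i] for an index the Python code only evaluates in range (pvGetc: pyGet? with a default that is never used)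
def pvGetc (l : List Char) (i : Int) : Char := PySem.List.pyGetD l i ' '

def are_two_adjacent_numbers_same_part2 (password_split : List Char) : Bool :=
  (PySem.List.pyRange 0 ((password_split.length : Int) - 1) 1).any fun p =>
    (pvGetc password_split p == pvGetc password_split (p + 1)) &&
    !((decide (p > 0) && (pvGetc password_split (p - 1) == pvGetc password_split p)) ||
      (decide (p < (password_split.length : Int) - 2) &&
        (pvGetc password_split (p + 2) == pvGetc password_split (p + 1))))

def are_digits_increasing (password_split : List Char) : Bool :=
  (PySem.List.pyRange 0 ((password_split.length : Int) - 1) 1).all fun i =>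
    !decide (pvGetc password_split i > pvGetc password_split (i + 1))

def check_password_for_validity_part2 (password : Int) : Bool :=
  let password_split := (PySem.Int.toStr password).toList
  !(decide (password < 100000) || decide (password > 999999) ||
    !are_two_adjacent_numbers_same_part2 password_split ||
    !are_digits_increasing password_split)

-- ===== PORT B =====
-- run lengths of consecutive equal characters (Source B's explicit fold over zip(s, s[1:]))
def pvRunLengths (s : List Char) : List Int :=
  let st := (s.zip (s.drop 1)).foldl
    (fun (st : List Int × Int) pc => if pc.2 == pc.1 then (st.1, st.2 + 1) else (st.1 ++ [st.2], 1))
    ([], 1)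
  st.1 ++ [st.2]

def check_password_for_validity_part2_alt (password : Int) : Bool :=
  if password < 100000 ∨ password > 999999 then false
  else
    let s := (PySem.Int.toStr password).toList
    (pvRunLengths s).contains 2 && (s.zip (s.drop 1)).all fun pc => decide (pc.1 ≤ pc.2)

-- ===== PRECONDITION & SPEC =====
def Spec_check_password_for_validity_part2 (password : Int) (out : Bool) : Prop := out = check_password_for_validity_part2_alt password
instance (password : Int) (out : Bool) : Decidable (Spec_check_password_for_validity_part2 password out) := by unfold Spec_check_password_for_validity_part2; infer_instance

-- ===== CLAIM (what is proved, stated in full; the proofs are below) =====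
def Claim_equal_check_password_for_validity_part2 : Prop := ∀ (password : Int), Dom_check_password_for_validity_part2 password → Spec_check_password_for_validity_part2 password (check_password_for_validity_part2 password)

-- ===== LEMMAS AND PROOFS =====

-- spec of B's run-length fold: first run of c counted from k, then the rest
def rlAux (c : Char) (k : Int) : List Char → List Int
  | [] => [k]
  | d :: t => if d == c then rlAux c (k + 1) t else k :: rlAux d 1 t

-- structural form of A's scan: p = "the char before the head equals the head"
def hasIso2 : Bool → List Char → Bool
  | _, [] => false
  | _, [_] => false
  | p, a :: b :: t =>
    ((a == b) && !(p || (decide (0 < t.length) && (t.getD 0 ' ' == b)))) ||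
      hasIso2 (a == b) (b :: t)

-- A's loop body over a Nat index, with the i = 0 left-guard generalized to p
def gstep (p : Bool) (l : List Char) (i : Nat) : Bool :=
  (l.getD i ' ' == l.getD (i + 1) ' ') &&
  !((if i = 0 then p else (l.getD (i - 1) ' ' == l.getD i ' ')) ||
    (decide (i < l.length - 2) && (l.getD (i + 2) ' ' == l.getD (i + 1) ' ')))

def gscan (p : Bool) (l : List Char) : Bool := (List.range (l.length - 1)).any (gstep p l)

theorem adj_eq_gscan (l : List Char) :
    are_two_adjacent_numbers_same_part2 l = gscan false l := by
  unfold are_two_adjacent_numbers_same_part2 gscan pvGetc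
  rw [PySem.List.pyRange_one, List.any_map]
  have hn : (((l.length : Int) - 1) - 0).toNat = l.length - 1 := by omega
  rw [hn]
  apply congrArg
  funext k
  simp only [Function.comp, zero_add]
  unfold gstep
  have c1 : ((k : Int) + 1) = ((k + 1 : Nat) : Int) := by push_cast; ring
  have c2 : ((k : Int) + 2) = ((k + 2 : Nat) : Int) := by push_cast; ring
  rw [c1, c2]
  simp only [PySem.List.pyGetD_natCast]
  have cd : decide ((k : Int) < (l.length : Int) - 2) = decide (k < l.length - 2) :=
    decide_eq_decide.mpr (by omega)
  rw [cd]
  by_cases hk : k = 0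
  · subst hk
    simp
  · have c3 : ((k : Int) - 1) = ((k - 1 : Nat) : Int) := by omega
    rw [c3]
    simp only [PySem.List.pyGetD_natCast]
    rw [if_neg hk]
    simp [Nat.pos_of_ne_zero hk]

theorem gstep_succ (p : Bool) (a b : Char) (t : List Char) (i : Nat) :
    gstep p (a :: b :: t) (i + 1) = gstep (a == b) (b :: t) i := by
  unfold gstep
  cases i with
  | zero => simp
  | succ j =>
    simp only [List.getD_cons_succ, List.length_cons, Nat.succ_sub_one]
    rw [if_neg (by omega), if_neg (by omega),
      decide_eq_decide.mpr (by omega : (j + 1 + 1 < t.length + 1 + 1 - 2) ↔ (j + 1 < t.length + 1 - 2))]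

theorem gscan_eq_hasIso2 (l : List Char) (p : Bool) : gscan p l = hasIso2 p l := by
  match l with
  | [] => simp [gscan, hasIso2]
  | [a] => simp [gscan, hasIso2]
  | a :: b :: t =>
    have ih := gscan_eq_hasIso2 (b :: t) (a == b)
    unfold gscan at *
    have hlen : (a :: b :: t).length - 1 = t.length + 1 := by simp
    rw [hlen, List.range_succ_eq_map, List.any_cons, List.any_map]
    have hshift : (gstep p (a :: b :: t) ∘ Nat.succ) = gstep (a == b) (b :: t) := by
      funext i; exact gstep_succ p a b t i
    simp only [List.length_cons, Nat.add_sub_cancel] at ih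
    rw [hshift, ih]
    have h0 : gstep p (a :: b :: t) 0 =
        ((a == b) && !(p || (decide (0 < t.length) && (t.getD 0 ' ' == b)))) := by
      simp [gstep]
    rw [h0]
    rfl

theorem hasIso2_eq_contains (t : List Char) (c : Char) (k : Int) (hk : 1 ≤ k) :
    (hasIso2 (decide (2 ≤ k)) (c :: t) || decide (k = 2 ∧ t.head? ≠ some c)) =
      (rlAux c k t).contains 2 := by
  induction t generalizing c k with
  | nil =>
    simp only [hasIso2, rlAux, Bool.false_or, List.contains_cons, List.contains_nil,
      Bool.or_false, List.head?_nil]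
    rw [Bool.eq_iff_iff]
    simp
    omega
  | cons d t ih =>
    simp only [rlAux]
    by_cases h : d == c
    · have hdc := eq_of_beq h; subst hdc
      have ih' := ih d (k + 1) (by omega)
      rw [if_pos h, ← ih']
      simp only [hasIso2, List.head?_cons, beq_self_eq_true, Bool.true_and]
      by_cases hk2 : 2 ≤ k
      · simp [hk2, show 2 ≤ k + 1 by omega, show ¬(k + 1 = 2) by omega]
      · have hk1 : k = 1 := by omega
        subst hk1
        rw [Bool.eq_iff_iff]
        cases t <;> simp [Bool.or_comm]
    · have hdc : d ≠ c := fun e => h (by simp [e])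
      have ih' := ih d 1 (by omega)
      rw [if_neg h]
      simp only [List.contains_cons]
      rw [← ih']
      simp only [hasIso2, List.head?_cons]
      rw [Bool.eq_iff_iff]
      simp [show (c == d) = false by simp; exact Ne.symm hdc, hdc, @eq_comm Int k 2]
      tauto

theorem foldRuns (t : List Char) (c : Char) (rs : List Int) (k : Int) :
    (let st := ((c :: t).zip t).foldl
        (fun (st : List Int × Int) pc => if pc.2 == pc.1 then (st.1, st.2 + 1) else (st.1 ++ [st.2], 1))
        (rs, k);
      st.1 ++ [st.2]) = rs ++ rlAux c k t := by
  induction t generalizing c rs k with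
  | nil => simp [rlAux]
  | cons d t ih =>
    simp only [List.zip_cons_cons, List.foldl_cons, rlAux]
    by_cases h : d == c
    · have hdc := eq_of_beq h; subst hdc
      simpa using ih d rs (k + 1)
    · simpa [h] using ih d (rs ++ [k]) 1

theorem adj_eq_runs (l : List Char) :
    are_two_adjacent_numbers_same_part2 l = (pvRunLengths l).contains 2 := by
  rw [adj_eq_gscan, gscan_eq_hasIso2]
  cases l with
  | nil => simp [hasIso2, pvRunLengths]
  | cons c t =>
    unfold pvRunLengths
    rw [show (c :: t).drop 1 = t from rfl, foldRuns t c [] 1, List.nil_append]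
    have h := hasIso2_eq_contains t c 1 (by omega)
    simpa using h

def istep (l : List Char) (i : Nat) : Bool := !decide (l.getD i ' ' > l.getD (i + 1) ' ')

theorem istep_succ (a b : Char) (t : List Char) (i : Nat) :
    istep (a :: b :: t) (i + 1) = istep (b :: t) i := by
  simp [istep]

theorem iscan_eq_zip (l : List Char) :
    (List.range (l.length - 1)).all (istep l) =
      ((l.zip (l.drop 1)).all fun pc => decide (pc.1 ≤ pc.2)) := by
  match l with
  | [] => simp
  | [a] => simp
  | a :: b :: t =>
    have ih := iscan_eq_zip (b :: t)
    have hlen : (a :: b :: t).length - 1 = t.length + 1 := by simp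
    rw [hlen, List.range_succ_eq_map, List.all_cons, List.all_map]
    have hshift : (istep (a :: b :: t) ∘ Nat.succ) = istep (b :: t) := by
      funext i; exact istep_succ a b t i
    simp only [List.length_cons, Nat.add_sub_cancel] at ih
    rw [hshift, ih]
    have h0 : istep (a :: b :: t) 0 = decide (a ≤ b) := by
      simp only [istep, List.getD_cons_zero, List.getD_cons_succ, gt_iff_lt]
      rw [decide_eq_decide.mpr not_le.symm, decide_not, Bool.not_not]
    rw [h0]
    rfl

theorem inc_eq_zip (l : List Char) :
    are_digits_increasing l = (l.zip (l.drop 1)).all fun pc => decide (pc.1 ≤ pc.2) := by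
  rw [← iscan_eq_zip]
  unfold are_digits_increasing pvGetc
  rw [PySem.List.pyRange_one, List.all_map]
  have hn : (((l.length : Int) - 1) - 0).toNat = l.length - 1 := by omega
  rw [hn]
  apply congrArg
  funext k
  simp only [Function.comp, zero_add]
  unfold istep
  have c1 : ((k : Int) + 1) = ((k + 1 : Nat) : Int) := by push_cast; ring
  rw [c1]
  simp only [PySem.List.pyGetD_natCast]

-- ===== VERDICT (by name: the statement is the Claim_ definition above) =====
theorem check_password_for_validity_part2_spec : Claim_equal_check_password_for_validity_part2 := by
  intro password _
  unfold Spec_check_password_for_validity_part2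
  by_cases h1 : password < 100000
  · simp [check_password_for_validity_part2, check_password_for_validity_part2_alt, h1]
  · by_cases h2 : password > 999999
    · simp [check_password_for_validity_part2, check_password_for_validity_part2_alt, h1, h2]
    · simp [check_password_for_validity_part2, check_password_for_validity_part2_alt, h1, h2,
        adj_eq_runs, inc_eq_zip]
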